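-- pv_equiv track=rewrite | github.com/ramandeep8421/Algorithms | maximizeMushrooms.py | check
-- ===== SOURCE A (Python) =====
-- def check(v, k, mid):
--     n = len(v)
--     if k < n:
--         res = 0
--         for i in range(k):
--             res += v[i]
--
--         curr_sum = res
--
--         for i in range(k, n):
--             curr_sum += (v[i] - v[i - k])
--             res = max(res, curr_sum)
--
--         res += (k + (k - 1)) // 2
--
--         return res >= mid
--
--     sum = 0
--
--     for it in v:
--         sum += it
--
--     sum += (n * k)
--
--     sum -= (n * (n + 1)) // 2
--
--     return sum >= mid
-- ===== SOURCE B (Python) =====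
-- def check(v, k, mid):
--     n = len(v)
--     if k < n:
--         pre = [0]
--         for x in v:
--             pre.append(pre[-1] + x)
--         best = max(pre[i + k] - pre[i] for i in range(n - k + 1))
--         return best + (2 * k - 1) // 2 >= mid
--     return sum(v) + n * k - n * (n + 1) // 2 >= mid
-- ===== Notes on version B (the rewrite author's own statement) =====
-- stated objective: alternative
-- what changed: Replaces the incremental sliding-window running max (single pass keeping curr_sum and res) by a prefix-sum table built once, then a separate pass taking the max of pre[i+k]-pre[i] over all window starts; the k>=n branch is collapsed to one arithmetic expression.
import Mathlib
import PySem

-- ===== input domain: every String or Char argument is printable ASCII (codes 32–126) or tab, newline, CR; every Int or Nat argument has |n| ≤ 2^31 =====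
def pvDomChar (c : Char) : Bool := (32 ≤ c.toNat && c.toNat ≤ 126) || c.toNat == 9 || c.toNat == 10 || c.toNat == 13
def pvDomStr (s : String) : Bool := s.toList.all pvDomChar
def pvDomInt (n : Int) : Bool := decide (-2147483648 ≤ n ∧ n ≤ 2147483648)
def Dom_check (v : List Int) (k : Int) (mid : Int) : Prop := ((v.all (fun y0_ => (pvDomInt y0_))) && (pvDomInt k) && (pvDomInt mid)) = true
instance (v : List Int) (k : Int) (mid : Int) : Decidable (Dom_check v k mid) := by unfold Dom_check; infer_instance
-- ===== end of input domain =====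

-- B replaces A's incremental sliding-window running max by a prefix-sum table built once
-- plus a separate max pass over pre[i+k]-pre[i] (objective: alternative, same cost).

-- ===== PORT A =====
def check (v : List Int) (k : Int) (mid : Int) : Bool :=
  let n : Int := v.length
  if k < n then
    let res := (PySem.List.pyRange 0 k 1).foldl (fun acc i => acc + PySem.List.pyGetD v i 0) 0
    let st := (PySem.List.pyRange k n 1).foldl
      (fun (p : Int × Int) i =>
        let c := p.2 + (PySem.List.pyGetD v i 0 - PySem.List.pyGetD v (i - k) 0)
        (max p.1 c, c)) (res, res)
    decide (st.1 + PySem.Int.floordiv (k + (k - 1)) 2 ≥ mid)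
  else
    let s := v.foldl (fun acc it => acc + it) 0
    let s := s + n * k
    let s := s - PySem.Int.floordiv (n * (n + 1)) 2
    decide (s ≥ mid)

-- ===== PORT B =====
def check_alt (v : List Int) (k : Int) (mid : Int) : Bool :=
  let n : Int := v.length
  if k < n then
    let pre := v.foldl (fun acc x => acc ++ [PySem.List.pyGetD acc (-1) 0 + x]) [(0 : Int)]
    -- Python's max over a nonempty generator; the `.getD 0` default is never used since k < n
    let best := (PySem.List.max? ((PySem.List.pyRange 0 (n - k + 1) 1).map
      (fun i => PySem.List.pyGetD pre (i + k) 0 - PySem.List.pyGetD pre i 0)) (fun y => y)).getD 0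
    decide (best + PySem.Int.floordiv (2 * k - 1) 2 ≥ mid)
  else
    decide (v.foldl (fun acc it => acc + it) 0 + n * k - PySem.Int.floordiv (n * (n + 1)) 2 ≥ mid)

-- ===== PRECONDITION & SPEC =====
-- Pre_ excludes exactly k < 0, where the Python A always raises IndexError
-- (v[i - k] runs past the end of the list, or an empty v is indexed negatively).
def Pre_check (v : List Int) (k : Int) (mid : Int) : Prop := 0 ≤ k
instance (v : List Int) (k : Int) (mid : Int) : Decidable (Pre_check v k mid) := by unfold Pre_check; infer_instance
def pvWitness_check : List Int × Int × Int := ([1, 2, 3], 2, 4)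

def Spec_check (v : List Int) (k : Int) (mid : Int) (out : Bool) : Prop := out = check_alt v k mid
instance (v : List Int) (k : Int) (mid : Int) (out : Bool) : Decidable (Spec_check v k mid out) := by unfold Spec_check; infer_instance

-- ===== CLAIM (what is proved, stated in full; the proofs are below) =====
def Claim_equal_check : Prop := ∀ (v : List Int) (k : Int) (mid : Int), Dom_check v k mid → Pre_check v k mid → Spec_check v k mid (check v k mid)

-- ===== LEMMAS AND PROOFS =====

/-- Prefix sum of the first `j` elements (Int index, clamped below at 0). -/
def Pfx (v : List Int) (j : Int) : Int := ((v.take j.toNat).sum)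

/-- Window sum over `[j-k, j)`. -/
def Win (v : List Int) (k j : Int) : Int := Pfx v j - Pfx v (j - k)

theorem pfx_succ (v : List Int) (j : Int) (h0 : 0 ≤ j) (h : j < (v.length : Int)) :
    Pfx v (j + 1) = Pfx v j + v[j.toNat]'(by omega) := by
  unfold Pfx
  have : (j + 1).toNat = j.toNat + 1 := by omega
  rw [this, List.sum_take_succ v j.toNat (by omega)]

/-- B's prefix list is the list of prefix sums. -/
theorem pre_eq (v : List Int) :
    v.foldl (fun acc x => acc ++ [PySem.List.pyGetD acc (-1) 0 + x]) [(0 : Int)]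
      = (List.range (v.length + 1)).map (fun j => ((v.take j).sum : Int)) := by
  induction v using List.reverseRecOn with
  | nil => simp
  | append_singleton u x ih =>
    rw [List.foldl_append, ih]
    have hne : (List.range (u.length + 1)).map (fun j => ((u.take j).sum : Int)) ≠ [] := by simp
    rw [List.foldl_cons, List.foldl_nil, PySem.List.pyGetD_neg_one _ _ hne]
    have hlast : ((List.range (u.length + 1)).map (fun j => ((u.take j).sum : Int))).getLast hne
        = u.sum := by
      rw [List.getLast_eq_getElem]
      simp
    rw [hlast]
    have : (List.range ((u ++ [x]).length + 1)).map (fun j => (((u ++ [x]).take j).sum : Int))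
        = (List.range (u.length + 1)).map (fun j => (((u ++ [x]).take j).sum : Int))
          ++ [(((u ++ [x]).take (u.length + 1)).sum : Int)] := by
      rw [show (u ++ [x]).length + 1 = (u.length + 1) + 1 by simp, List.range_succ,
        List.map_append]
      simp
    rw [this]
    congr 1
    · apply List.map_congr_left
      intro j hj
      simp at hj
      rw [List.take_append_of_le_length (by omega)]
    · rw [List.take_of_length_le (by simp)]; simp

theorem getPre (v : List Int) (i : Int) (h0 : 0 ≤ i) (h : i ≤ (v.length : Int)) :
    PySem.List.pyGetD ((List.range (v.length + 1)).map (fun j => ((v.take j).sum : Int))) i 0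
      = Pfx v i := by
  rw [PySem.List.pyGetD_eq_getElem _ 0 h0 (by simp; omega)]
  simp [Pfx]

/-- A's first loop computes the prefix sum `Pfx v k`. -/
theorem loop1_eq (v : List Int) (k : Int) (h0 : 0 ≤ k) (h : k ≤ (v.length : Int)) :
    (PySem.List.pyRange 0 k 1).foldl (fun acc i => acc + PySem.List.pyGetD v i 0) 0 = Pfx v k := by
  revert h
  induction k, h0 using Int.le_induction with
  | base => intro _; simp [PySem.List.pyRange_one_eq_nil le_rfl, Pfx]
  | succ m hm ih =>
    intro h
    rw [PySem.List.pyRange_one_succ_right hm, List.foldl_append, ih (by omega)]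
    simp only [List.foldl_cons, List.foldl_nil]
    rw [PySem.List.pyGetD_eq_getElem _ 0 hm (by omega), pfx_succ v m hm (by omega)]

/-- A's second loop: running max of all window sums. -/
theorem loop2_eq (v : List Int) (k : Int) (h0 : 0 ≤ k) (m : Int) (hk : k ≤ m)
    (hm : m ≤ (v.length : Int)) :
    (PySem.List.pyRange k m 1).foldl
      (fun (p : Int × Int) i =>
        let c := p.2 + (PySem.List.pyGetD v i 0 - PySem.List.pyGetD v (i - k) 0)
        (max p.1 c, c)) (Pfx v k, Pfx v k)
    = (((PySem.List.pyRange (k + 1) (m + 1) 1).map (fun j => Win v k j)).foldl max (Pfx v k),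
       Win v k m) := by
  revert hm
  induction m, hk using Int.le_induction with
  | base =>
    intro _
    simp [PySem.List.pyRange_one_eq_nil (le_refl k), PySem.List.pyRange_one_eq_nil (le_refl (k+1)),
      Win, Pfx]
  | succ m hkm ih =>
    intro hm
    have hmlt : m < (v.length : Int) := by omega
    rw [PySem.List.pyRange_one_succ_right hkm, List.foldl_append, ih (by omega)]
    rw [show m + 1 + 1 = (m + 1) + 1 from rfl,
      PySem.List.pyRange_one_succ_right (by omega : k + 1 ≤ m + 1), List.map_append,
      List.foldl_append]
    simp only [List.foldl_cons, List.foldl_nil, List.map_cons, List.map_nil]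
    have hstep : Win v k m + (PySem.List.pyGetD v m 0 - PySem.List.pyGetD v (m - k) 0)
        = Win v k (m + 1) := by
      rw [PySem.List.pyGetD_eq_getElem _ 0 (by omega) hmlt,
        PySem.List.pyGetD_eq_getElem _ 0 (by omega : (0:Int) ≤ m - k) (by omega)]
      have h1 : Win v k (m + 1) = Pfx v (m + 1) - Pfx v (m + 1 - k) := rfl
      have h2 : Pfx v (m + 1) = Pfx v m + v[m.toNat]'(by omega) := pfx_succ v m (by omega) hmlt
      have h3 : Pfx v (m + 1 - k) = Pfx v (m - k) + v[(m - k).toNat]'(by omega) := by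
        rw [show m + 1 - k = (m - k) + 1 by ring]
        exact pfx_succ v (m - k) (by omega) (by omega)
      rw [h1, h2, h3]
      unfold Win
      ring
    rw [hstep]

/-- B's mapped window-sum list equals A's (re-indexed by the window's right end). -/
theorem maps_eq (v : List Int) (k : Int) (h0 : 0 ≤ k) (hlt : k < (v.length : Int)) :
    (PySem.List.pyRange 1 ((v.length : Int) - k + 1) 1).map
      (fun i => PySem.List.pyGetD ((List.range (v.length + 1)).map (fun j => ((v.take j).sum : Int))) (i + k) 0
        - PySem.List.pyGetD ((List.range (v.length + 1)).map (fun j => ((v.take j).sum : Int))) i 0)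
    = (PySem.List.pyRange (k + 1) ((v.length : Int) + 1) 1).map (fun j => Win v k j) := by
  rw [PySem.List.pyRange_one, PySem.List.pyRange_one, List.map_map, List.map_map]
  rw [show ((v.length : Int) - k + 1 - 1).toNat = ((v.length : Int) - k).toNat by omega,
      show ((v.length : Int) + 1 - (k + 1)).toNat = ((v.length : Int) - k).toNat by omega]
  apply List.map_congr_left
  intro j hj
  rw [List.mem_range] at hj
  have hj' : (j : Int) < (v.length : Int) - k := by omega
  simp only [Function.comp]
  rw [getPre v (1 + (j : Int) + k) (by omega) (by omega),
      getPre v (1 + (j : Int)) (by omega) (by omega)]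
  unfold Win Pfx
  rw [show (1 + (j : Int) + k).toNat = (k + 1 + (j : Int)).toNat by omega,
      show (1 + (j : Int)).toNat = (k + 1 + (j : Int) - k).toNat by omega]

-- ===== VERDICT (by name: the statement is the Claim_ definition above) =====
theorem check_spec : Claim_equal_check := by
  intro v k mid _ hk
  unfold Pre_check at hk
  unfold Spec_check check check_alt
  by_cases hlt : k < (v.length : Int)
  · simp only [if_pos hlt]
    rw [loop1_eq v k hk (le_of_lt hlt)]
    rw [loop2_eq v k hk (v.length : Int) (le_of_lt hlt) le_rfl]
    rw [pre_eq v]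
    rw [PySem.List.pyRange_one_cons (by omega : (0:Int) < (v.length : Int) - k + 1)]
    rw [List.map_cons, PySem.List.max?_id_cons, Option.getD_some]
    rw [show (0:Int) + 1 = 1 by norm_num]
    rw [maps_eq v k hk hlt]
    rw [getPre v (0 + k) (by omega) (by omega), getPre v 0 (by omega) (by omega)]
    rw [show (0 : Int) + k = k by ring]
    rw [show Pfx v 0 = 0 from rfl, sub_zero]
    rw [show k + (k - 1) = 2 * k - 1 by ring]
  · simp only [if_neg hlt]
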